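-- pv_equiv track=rewrite | github.com/IgorBlokhin/Graph-Theory | src/Diktyonphi.py | all_sheppard_codes
-- ===== SOURCE A (Python) =====
-- from itertools import product as prod
--
-- def all_sheppard_codes(n):
--     """
--     Generátor „první poloviny“ Sheppardových kódů pro dané n.
--     Celkový počet Sheppardových kódů je (n-1)!,
--     vrací (n-1)! / 2 (lexikograficky první polovinu).
--     """
--     ranges = []
--     total = 1
--
--     for j in range(n - 1):
--         L = n - 1 - j
--         total *= L
--         ranges.append(range(0, L))
--
--     limit = int(total / 2)
--     count = 0
--
--     for code in prod(*ranges):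
--         if count >= limit:
--             break
--         yield code
--         count += 1
-- ===== SOURCE B (Python) =====
-- def all_sheppard_codes(n):
--     """First (n-1)!/2 Sheppard codes, unranked directly from their lexicographic index."""
--     Ls = []
--     total = 1
--     for j in range(n - 1):
--         L = n - 1 - j
--         total *= L
--         Ls.append(L)
--     limit = int(total / 2)
--     for i in range(limit):
--         digits = []
--         x = i
--         for r in reversed(Ls):
--             digits.append(x % r)
--             x //= r
--         yield tuple(reversed(digits))
-- ===== Notes on version B (the rewrite author's own statement) =====
-- stated objective: alternative
-- what changed: B replaces the itertools.product enumeration with direct mixed-radix unranking: each of the first limit codes is computed independently from its lexicographic index i by repeated divmod over the radices, instead of being produced by the nested product iterator.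
-- outside the precondition, e.g. on all_sheppard_codes(172): A raises OverflowError, B raises OverflowError
import Mathlib
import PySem

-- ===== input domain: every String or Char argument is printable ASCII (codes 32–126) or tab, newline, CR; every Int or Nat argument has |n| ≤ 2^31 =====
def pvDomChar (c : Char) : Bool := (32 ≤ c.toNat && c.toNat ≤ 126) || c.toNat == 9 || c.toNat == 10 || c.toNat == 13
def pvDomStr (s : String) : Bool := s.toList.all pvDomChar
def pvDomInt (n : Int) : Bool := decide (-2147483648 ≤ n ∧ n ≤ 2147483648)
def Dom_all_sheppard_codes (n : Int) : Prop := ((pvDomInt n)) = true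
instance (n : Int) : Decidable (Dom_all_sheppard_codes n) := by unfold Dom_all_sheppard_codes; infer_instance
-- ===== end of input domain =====

-- ===== PORT A =====
-- B changes the enumeration only: instead of materialising the itertools.product stream, it unranks
-- each code from its integer index (objective: alternative decomposition, same output).
-- If A mutates nothing; equivalence is about the returned (fully consumed) generator stream.

-- models CPython's `int(t / 2)` for 1 ≤ t < 2^1024: true division rounds t/2 to the nearest double
-- (round-half-to-even at 53 significant bits), int() then truncates toward zero.  Exact on Pre_.
def pvRnd53 (t : Int) : Int :=
  if t < 2 ^ 53 then t
  else
    let s : Nat := PySem.Int.bitLength t - 53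
    let p : Int := 2 ^ s
    let q : Int := t / p
    let r : Int := t % p
    let h : Int := p / 2
    (if h < r ∨ (r = h ∧ q % 2 = 1) then q + 1 else q) * p

def pvIntTruncHalf (t : Int) : Int := pvRnd53 t / 2

-- itertools.product(*[range(0, L) for L in Ls]) in lexicographic order (leftmost slowest)
def pvProd : List Int → List (List Int)
  | [] => [[]]
  | L :: rest => (PySem.List.pyRange 0 L 1).flatMap (fun d => (pvProd rest).map (fun c => d :: c))

-- A's consuming loop: yield while count < limit, then break
def pvEmit : List (List Int) → Int → Int → List (List Int)
  | [], _, _ => []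
  | c :: cs, limit, count => if count ≥ limit then [] else c :: pvEmit cs limit (count + 1)

def all_sheppard_codes (n : Int) : List (List Int) :=
  let rt := (PySem.List.pyRange 0 (n - 1) 1).foldl
      (fun (acc : List Int × Int) j => (acc.1 ++ [n - 1 - j], acc.2 * (n - 1 - j))) ([], 1)
  let limit := pvIntTruncHalf rt.2
  pvEmit (pvProd rt.1) limit 0

-- ===== PORT B =====
-- digits = []; x = i; for r in reversed(Ls): digits.append(x % r); x //= r;  tuple(reversed(digits))
def pvUnrank (Ls : List Int) (i : Int) : List Int :=
  (Ls.reverse.foldl (fun (acc : List Int × Int) r =>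
      (acc.1 ++ [PySem.Int.mod acc.2 r], PySem.Int.floordiv acc.2 r)) ([], i)).1.reverse

def all_sheppard_codes_alt (n : Int) : List (List Int) :=
  let rt := (PySem.List.pyRange 0 (n - 1) 1).foldl
      (fun (acc : List Int × Int) j => (acc.1 ++ [n - 1 - j], acc.2 * (n - 1 - j))) ([], 1)
  let limit := pvIntTruncHalf rt.2
  (PySem.List.pyRange 0 limit 1).map (fun i => pvUnrank rt.1 i)

-- ===== PRECONDITION & SPEC =====
-- For n ≥ 172 the factorial total is too large for a Python float, so `int(total / 2)` raises
-- OverflowError in both A and B; Pre_ excludes exactly those inputs.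
def Pre_all_sheppard_codes (n : Int) : Prop := n ≤ 171
instance (n : Int) : Decidable (Pre_all_sheppard_codes n) := by unfold Pre_all_sheppard_codes; infer_instance
def pvWitness_all_sheppard_codes : Int := (5)

def Spec_all_sheppard_codes (n : Int) (out : List (List Int)) : Prop := out = all_sheppard_codes_alt n
instance (n : Int) (out : List (List Int)) : Decidable (Spec_all_sheppard_codes n out) := by unfold Spec_all_sheppard_codes; infer_instance

-- ===== CLAIM (what is proved, stated in full; the proofs are below) =====
def Claim_equal_all_sheppard_codes : Prop := ∀ (n : Int), Dom_all_sheppard_codes n → Pre_all_sheppard_codes n → Spec_all_sheppard_codes n (all_sheppard_codes n)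

-- ===== LEMMAS AND PROOFS =====

-- A's emitting loop is `take`
theorem pvEmit_eq_take (cs : List (List Int)) (limit : Int) :
    ∀ count : Int, pvEmit cs limit count = cs.take (limit - count).toNat := by
  induction cs with
  | nil => intro c; simp [pvEmit]
  | cons x xs ih =>
      intro c
      by_cases h : c ≥ limit
      · have h0 : (limit - c).toNat = 0 := by omega
        simp [pvEmit, h, h0]
      · have h1 : (limit - c).toNat = (limit - (c + 1)).toNat + 1 := by omega
        simp [pvEmit, h, h1, ih (c + 1)]

-- the final quotient of B's digit loop is i // (Ls.prod)
theorem pvUnrank_snd (Ls : List Int) :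
    ∀ i : Int, (∀ L ∈ Ls, 0 < L) →
    (Ls.reverse.foldl (fun (acc : List Int × Int) r =>
      (acc.1 ++ [PySem.Int.mod acc.2 r], PySem.Int.floordiv acc.2 r)) ([], i)).2 = i / Ls.prod := by
  induction Ls with
  | nil => intro i _; simp
  | cons L rest ih =>
      intro i hpos
      have hL : 0 < L := hpos L (by simp)
      have hrest : ∀ x ∈ rest, 0 < x := fun x hx => hpos x (by simp [hx])
      have hQ : 0 < rest.prod := List.prod_pos hrest
      simp only [List.reverse_cons, List.foldl_append, List.foldl_cons, List.foldl_nil]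
      rw [ih i hrest, PySem.Int.floordiv_eq_ediv_of_pos hL,
        Int.ediv_ediv_of_nonneg (le_of_lt hQ), List.prod_cons, mul_comm]

theorem pvUnrank_cons (L : Int) (rest : List Int) (hrest : ∀ x ∈ rest, 0 < x) (i : Int) :
    pvUnrank (L :: rest) i = PySem.Int.mod (i / rest.prod) L :: pvUnrank rest i := by
  unfold pvUnrank
  simp only [List.reverse_cons, List.foldl_append, List.foldl_cons, List.foldl_nil,
    List.reverse_append, List.reverse_nil, List.nil_append, List.cons_append]
  rw [pvUnrank_snd rest i hrest]

-- digits depend on the index only through its residue mod the radix product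
theorem pvUnrank_emod (Ls : List Int) :
    ∀ i : Int, (∀ L ∈ Ls, 0 < L) → pvUnrank Ls (i % Ls.prod) = pvUnrank Ls i := by
  induction Ls with
  | nil => intro i _; simp [pvUnrank]
  | cons L rest ih =>
      intro i hpos
      have hL : 0 < L := hpos L (by simp)
      have hrest : ∀ x ∈ rest, 0 < x := fun x hx => hpos x (by simp [hx])
      have hQ : 0 < rest.prod := List.prod_pos hrest
      rw [pvUnrank_cons L rest hrest, pvUnrank_cons L rest hrest, List.prod_cons]
      congr 1
      -- heads: ((i % (L*Q)) / Q) ≡ i / Q  (mod L)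
      · rw [PySem.Int.mod_eq_emod_of_pos hL, PySem.Int.mod_eq_emod_of_pos hL]
        have hrep : i % (L * rest.prod) = i + rest.prod * (-(L * (i / (L * rest.prod)))) := by
          rw [Int.emod_def]; ring
        rw [hrep, Int.add_mul_ediv_left _ _ (ne_of_gt hQ)]
        have h2 : i / rest.prod + -(L * (i / (L * rest.prod)))
            = i / rest.prod + L * (-(i / (L * rest.prod))) := by ring
        rw [h2, Int.add_mul_emod_self_left]
      -- tails: both equal pvUnrank rest (i % Q)
      · have hdvd : rest.prod ∣ L * rest.prod := dvd_mul_left _ _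
        calc pvUnrank rest (i % (L * rest.prod))
            = pvUnrank rest (i % (L * rest.prod) % rest.prod) := (ih _ hrest).symm
          _ = pvUnrank rest (i % rest.prod) := by rw [Int.emod_emod_of_dvd _ hdvd]
          _ = pvUnrank rest i := ih i hrest

-- split [0, l*Q) into l consecutive blocks of size Q
theorem pyRange_mul_split (l : Nat) (Q : Int) (hQ : 0 < Q) :
    PySem.List.pyRange 0 ((l : Int) * Q) 1 =
      (PySem.List.pyRange 0 (l : Int) 1).flatMap
        (fun d => (PySem.List.pyRange 0 Q 1).map (fun k => d * Q + k)) := by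
  induction l with
  | zero => simp [PySem.List.pyRange_one_eq_nil]
  | succ m ih =>
      have hm0 : (0 : Int) ≤ (m : Int) := by positivity
      have hmul : ((m : Int) + 1) * Q = (m : Int) * Q + Q := by ring
      have h1 : PySem.List.pyRange 0 ((m : Int) + 1) 1
          = PySem.List.pyRange 0 (m : Int) 1 ++ [(m : Int)] :=
        PySem.List.pyRange_one_succ_right hm0
      have h2 : PySem.List.pyRange 0 (((m : Int) + 1) * Q) 1
          = PySem.List.pyRange 0 ((m : Int) * Q) 1
            ++ PySem.List.pyRange ((m : Int) * Q) ((m : Int) * Q + Q) 1 := by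
        rw [hmul]
        exact PySem.List.pyRange_one_append 0 ((m : Int) * Q) ((m : Int) * Q + Q)
          (by positivity) (by omega)
      have h3 : PySem.List.pyRange ((m : Int) * Q) ((m : Int) * Q + Q) 1
          = (PySem.List.pyRange 0 Q 1).map (fun k => (m : Int) * Q + k) := by
        rw [PySem.List.pyRange_one, PySem.List.pyRange_one, add_sub_cancel_left, sub_zero,
          List.map_map]
        exact List.map_congr_left (fun k _ => by simp)
      push_cast
      rw [h2, h1, List.flatMap_append, ih, List.flatMap_cons, List.flatMap_nil,
        List.append_nil, h3]

-- the full lexicographic product is the unranking of [0, prod)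
theorem pvProd_eq_map_unrank (Ls : List Int) (hpos : ∀ L ∈ Ls, 0 < L) :
    pvProd Ls = (PySem.List.pyRange 0 Ls.prod 1).map (pvUnrank Ls) := by
  induction Ls with
  | nil => rfl
  | cons L rest ih =>
      have hL : 0 < L := hpos L (by simp)
      have hrest : ∀ x ∈ rest, 0 < x := fun x hx => hpos x (by simp [hx])
      have hQ : 0 < rest.prod := List.prod_pos hrest
      have hcast : ((L.toNat : Nat) : Int) = L := Int.toNat_of_nonneg (le_of_lt hL)
      have hsplit := pyRange_mul_split L.toNat rest.prod hQ
      rw [hcast] at hsplit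
      show (PySem.List.pyRange 0 L 1).flatMap (fun d => (pvProd rest).map (fun c => d :: c))
          = _
      rw [List.prod_cons, hsplit, List.map_flatMap, ih hrest]
      refine List.flatMap_congr (fun d hd => ?_)
      obtain ⟨hd0, hdL⟩ := PySem.List.mem_pyRange_one.mp hd
      rw [List.map_map, List.map_map]
      refine List.map_congr_left (fun k hk => ?_)
      obtain ⟨hk0, hkQ⟩ := PySem.List.mem_pyRange_one.mp hk
      show d :: pvUnrank rest k = pvUnrank (L :: rest) (d * rest.prod + k)
      rw [pvUnrank_cons L rest hrest]
      have hdiv : (d * rest.prod + k) / rest.prod = d := by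
        rw [show d * rest.prod + k = k + rest.prod * d by ring,
          Int.add_mul_ediv_left _ _ (ne_of_gt hQ), Int.ediv_eq_zero_of_lt hk0 hkQ, zero_add]
      have hhead : PySem.Int.mod ((d * rest.prod + k) / rest.prod) L = d := by
        rw [hdiv, PySem.Int.mod_eq_emod_of_pos hL, Int.emod_eq_of_lt hd0 hdL]
      have htail : pvUnrank rest (d * rest.prod + k) = pvUnrank rest k := by
        have h1 : (d * rest.prod + k) % rest.prod = k := by
          rw [show d * rest.prod + k = k + rest.prod * d by ring,
            Int.add_mul_emod_self_left, Int.emod_eq_of_lt hk0 hkQ]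
        calc pvUnrank rest (d * rest.prod + k)
            = pvUnrank rest ((d * rest.prod + k) % rest.prod) := (pvUnrank_emod rest _ hrest).symm
          _ = pvUnrank rest k := by rw [h1]
      rw [hhead, htail]

theorem pvRnd53_bounds (t : Int) (ht : 1 ≤ t) : 0 ≤ pvRnd53 t ∧ pvRnd53 t ≤ 2 * t := by
  rcases lt_or_ge t (2 ^ 53) with hlt | hlt
  · simp only [pvRnd53, if_pos hlt]
    omega
  · have hbl : 54 ≤ PySem.Int.bitLength t := by
      by_contra hc
      have h1 := PySem.Int.lt_two_pow_bitLength t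
      have h2 : (2 : Nat) ^ PySem.Int.bitLength t ≤ 2 ^ 53 :=
        Nat.pow_le_pow_right (by norm_num) (by omega)
      have h4 : t.natAbs < 2 ^ 53 := lt_of_lt_of_le h1 h2
      have h5 : ((t.natAbs : Nat) : Int) < ((2 ^ 53 : Nat) : Int) := by exact_mod_cast h4
      rw [Int.natAbs_of_nonneg (by omega : (0:Int) ≤ t)] at h5
      norm_num at h5
      omega
    have hple : (2 : Int) ^ (PySem.Int.bitLength t - 53) ≤ t := by
      have h1 : (2 : Nat) ^ (PySem.Int.bitLength t - 53) ≤ 2 ^ (PySem.Int.bitLength t - 1) :=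
        Nat.pow_le_pow_right (by norm_num) (by omega)
      have h2 := PySem.Int.two_pow_bitLength_le t (by omega)
      have h4 : ((2 ^ (PySem.Int.bitLength t - 53) : Nat) : Int) ≤ ((t.natAbs : Nat) : Int) := by
        exact_mod_cast le_trans h1 h2
      rw [Int.natAbs_of_nonneg (by omega : (0:Int) ≤ t)] at h4
      calc (2 : Int) ^ (PySem.Int.bitLength t - 53)
          = ((2 ^ (PySem.Int.bitLength t - 53) : Nat) : Int) := by push_cast; ring
        _ ≤ t := h4
    have hp : (0 : Int) < 2 ^ (PySem.Int.bitLength t - 53) := by positivity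
    have hq0 : 0 ≤ t / 2 ^ (PySem.Int.bitLength t - 53) := Int.ediv_nonneg (by omega) (by omega)
    have hqp : t / 2 ^ (PySem.Int.bitLength t - 53) * 2 ^ (PySem.Int.bitLength t - 53) ≤ t :=
      Int.ediv_mul_le t (ne_of_gt hp)
    simp only [pvRnd53, if_neg (not_lt.mpr hlt)]
    split_ifs with hr
    · constructor
      · exact mul_nonneg (by linarith) (le_of_lt hp)
      · have hexp : (t / 2 ^ (PySem.Int.bitLength t - 53) + 1) * 2 ^ (PySem.Int.bitLength t - 53)
            = t / 2 ^ (PySem.Int.bitLength t - 53) * 2 ^ (PySem.Int.bitLength t - 53)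
              + 2 ^ (PySem.Int.bitLength t - 53) := by ring
        rw [hexp]
        linarith
    · constructor
      · exact mul_nonneg hq0 (le_of_lt hp)
      · linarith

theorem pvIntTruncHalf_bounds (t : Int) (ht : 1 ≤ t) :
    0 ≤ pvIntTruncHalf t ∧ pvIntTruncHalf t ≤ t := by
  obtain ⟨h1, h2⟩ := pvRnd53_bounds t ht
  unfold pvIntTruncHalf
  omega

-- ===== VERDICT (by name: the statement is the Claim_ definition above) =====
theorem all_sheppard_codes_spec : Claim_equal_all_sheppard_codes := by
  intro n _ _
  unfold Spec_all_sheppard_codes all_sheppard_codes all_sheppard_codes_alt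
  simp only [PySem.List.foldl_prod_mk (fun (acc : List Int) (j : Int) => acc ++ [n - 1 - j])
      (fun (t : Int) (j : Int) => t * (n - 1 - j)),
    PySem.List.foldl_append_singleton_eq_map, List.nil_append]
  set Ls : List Int := (PySem.List.pyRange 0 (n - 1) 1).map (fun j => n - 1 - j) with hLs
  have hpos : ∀ L ∈ Ls, 0 < L := by
    intro L hL
    rw [hLs] at hL
    obtain ⟨j, hj, rfl⟩ := List.mem_map.mp hL
    have := (PySem.List.mem_pyRange_one).mp hj
    omega
  have hprod : (PySem.List.pyRange 0 (n - 1) 1).foldl (fun t j => t * (n - 1 - j)) 1 = Ls.prod := by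
    rw [hLs, List.prod_eq_foldl, List.foldl_map]
  rw [hprod]
  have hP : 0 < Ls.prod := List.prod_pos hpos
  obtain ⟨hl0, hl1⟩ := pvIntTruncHalf_bounds Ls.prod (by omega)
  rw [pvEmit_eq_take, pvProd_eq_map_unrank Ls hpos, sub_zero, ← List.map_take]
  show List.map (pvUnrank Ls) _ = List.map (pvUnrank Ls) _
  congr 1
  rw [PySem.List.pyRange_one, PySem.List.pyRange_one, ← List.map_take, List.take_range]
  congr 2
  omega
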